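-- pv_equiv track=rewrite | github.com/tdayris/snakemake-wrappers | bio/BiGR/fix_vcf/wrapper.py | sort_headers
-- ===== SOURCE A (Python) =====
-- def sort_headers(lines) -> str:
--     infos = []
--     formats = []
--     filters = []
--     contigs = []
--     fileformats = []
--     others = []
--
--     for line in lines:
--         if line.startswith("##INFO"):
--             infos.append(line)
--         elif line.startswith("##FORMAT"):
--             formats.append(line)
--         elif line.startswith("##FILTER"):
--             filters.append(line)
--         elif line.startswith("##contig"):
--             contigs.append(line)
--         elif line.startswith("##fileformat"):
--             fileformats.append(line)
--         else:
--             others.append(line)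
--
--     return "".join(fileformats + filters + formats + infos + others + contigs)
-- ===== SOURCE B (Python) =====
-- def sort_headers(lines) -> str:
--     prefixes = ("##fileformat", "##FILTER", "##FORMAT", "##INFO", "##contig")
--     fileformats = [l for l in lines if l.startswith("##fileformat")]
--     filters = [l for l in lines if l.startswith("##FILTER")]
--     formats = [l for l in lines if l.startswith("##FORMAT")]
--     infos = [l for l in lines if l.startswith("##INFO")]
--     others = [l for l in lines if not l.startswith(prefixes)]
--     contigs = [l for l in lines if l.startswith("##contig")]
--     return "".join(fileformats + filters + formats + infos + others + contigs)
-- ===== Notes on version B (the rewrite author's own statement) =====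
-- stated objective: alternative
-- what changed: Replaces the single categorizing loop with an elif chain and six accumulators by six independent comprehension passes, one per output group (the five prefixes are mutually exclusive, so plain startswith filters equal the elif groups).
import Mathlib
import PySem

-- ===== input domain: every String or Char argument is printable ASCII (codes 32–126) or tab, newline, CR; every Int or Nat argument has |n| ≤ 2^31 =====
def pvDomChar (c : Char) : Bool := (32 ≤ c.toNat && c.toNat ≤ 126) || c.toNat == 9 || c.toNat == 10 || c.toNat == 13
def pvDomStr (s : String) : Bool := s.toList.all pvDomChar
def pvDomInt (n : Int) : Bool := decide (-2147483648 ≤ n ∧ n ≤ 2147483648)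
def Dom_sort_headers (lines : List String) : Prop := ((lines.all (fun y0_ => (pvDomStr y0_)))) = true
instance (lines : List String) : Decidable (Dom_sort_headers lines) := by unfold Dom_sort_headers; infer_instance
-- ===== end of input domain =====

-- B replaces A's single elif-chain loop with six independent filter passes, one per group (alternative decomposition, same cost).

-- ===== PORT A =====
-- A's loop: one pass over lines, six accumulators, elif chain in source order.
def sortHeadersStepA (st : List String × List String × List String × List String × List String × List String)
    (line : String) : List String × List String × List String × List String × List String × List String :=
  let (infos, formats, filters, contigs, fileformats, others) := st
  if PySem.Str.startswith line "##INFO" then (infos ++ [line], formats, filters, contigs, fileformats, others)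
  else if PySem.Str.startswith line "##FORMAT" then (infos, formats ++ [line], filters, contigs, fileformats, others)
  else if PySem.Str.startswith line "##FILTER" then (infos, formats, filters ++ [line], contigs, fileformats, others)
  else if PySem.Str.startswith line "##contig" then (infos, formats, filters, contigs ++ [line], fileformats, others)
  else if PySem.Str.startswith line "##fileformat" then (infos, formats, filters, contigs, fileformats ++ [line], others)
  else (infos, formats, filters, contigs, fileformats, others ++ [line])

def sort_headers (lines : List String) : String :=
  let st := lines.foldl sortHeadersStepA ([], [], [], [], [], [])
  let (infos, formats, filters, contigs, fileformats, others) := st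
  PySem.Str.join "" (fileformats ++ filters ++ formats ++ infos ++ others ++ contigs)

-- ===== PORT B =====
-- B: six independent filter passes; l.startswith(prefixes) on the tuple = the disjunction in tuple order.
def sort_headers_alt (lines : List String) : String :=
  let fileformats := lines.filter (fun l => PySem.Str.startswith l "##fileformat")
  let filters := lines.filter (fun l => PySem.Str.startswith l "##FILTER")
  let formats := lines.filter (fun l => PySem.Str.startswith l "##FORMAT")
  let infos := lines.filter (fun l => PySem.Str.startswith l "##INFO")
  let others := lines.filter (fun l =>
    !(PySem.Str.startswith l "##fileformat" || PySem.Str.startswith l "##FILTER" ||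
      PySem.Str.startswith l "##FORMAT" || PySem.Str.startswith l "##INFO" ||
      PySem.Str.startswith l "##contig"))
  let contigs := lines.filter (fun l => PySem.Str.startswith l "##contig")
  PySem.Str.join "" (fileformats ++ filters ++ formats ++ infos ++ others ++ contigs)

-- ===== PRECONDITION & SPEC =====
def Spec_sort_headers (lines : List String) (out : String) : Prop := out = sort_headers_alt lines
instance (lines : List String) (out : String) : Decidable (Spec_sort_headers lines out) := by unfold Spec_sort_headers; infer_instance

-- ===== CLAIM (what is proved, stated in full; the proofs are below) =====
def Claim_equal_sort_headers : Prop := ∀ (lines : List String), Dom_sort_headers lines → Spec_sort_headers lines (sort_headers lines)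

-- ===== LEMMAS AND PROOFS =====

-- the five category prefixes are pairwise incomparable, so no line starts with two of them
theorem pv_sw_excl (s p q : String) (hp : ¬ p.toList <+: q.toList) (hq : ¬ q.toList <+: p.toList)
    (h : PySem.Str.startswith s p = true) : PySem.Str.startswith s q = false := by
  by_contra hc
  have hq' : PySem.Str.startswith s q = true := by
    cases hqb : PySem.Str.startswith s q with
    | false => exact absurd hqb hc
    | true => rfl
  rw [PySem.Str.startswith_eq, PySem.Chars.startswith_iff] at h hq'
  rcases List.prefix_or_prefix_of_prefix h hq' with h1 | h1
  · exact hp h1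
  · exact hq h1

-- A's step with the five category tests abstracted, so the loop invariant below is proved once, generically
def pvStep (p1 p2 p3 p4 p5 : String → Bool)
    (st : List String × List String × List String × List String × List String × List String)
    (line : String) : List String × List String × List String × List String × List String × List String :=
  let (infos, formats, filters, contigs, fileformats, others) := st
  if p1 line then (infos ++ [line], formats, filters, contigs, fileformats, others)
  else if p2 line then (infos, formats ++ [line], filters, contigs, fileformats, others)
  else if p3 line then (infos, formats, filters ++ [line], contigs, fileformats, others)
  else if p4 line then (infos, formats, filters, contigs ++ [line], fileformats, others)
  else if p5 line then (infos, formats, filters, contigs, fileformats ++ [line], others)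
  else (infos, formats, filters, contigs, fileformats, others ++ [line])

-- the loop invariant: pairwise-exclusive tests make each accumulator exactly its filter
theorem pv_gen (p1 p2 p3 p4 p5 : String → Bool)
    (e21 : ∀ l, p1 l = true → p2 l = false)
    (e31 : ∀ l, p1 l = true → p3 l = false) (e32 : ∀ l, p2 l = true → p3 l = false)
    (e41 : ∀ l, p1 l = true → p4 l = false) (e42 : ∀ l, p2 l = true → p4 l = false)
    (e43 : ∀ l, p3 l = true → p4 l = false)
    (e51 : ∀ l, p1 l = true → p5 l = false) (e52 : ∀ l, p2 l = true → p5 l = false)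
    (e53 : ∀ l, p3 l = true → p5 l = false) (e54 : ∀ l, p4 l = true → p5 l = false)
    (t : List String) (i fo fi c ff o : List String) :
    t.foldl (pvStep p1 p2 p3 p4 p5) (i, fo, fi, c, ff, o) =
      (i ++ t.filter p1, fo ++ t.filter p2, fi ++ t.filter p3, c ++ t.filter p4, ff ++ t.filter p5,
       o ++ t.filter (fun l => !(p5 l || p3 l || p2 l || p1 l || p4 l))) := by
  induction t generalizing i fo fi c ff o with
  | nil => simp
  | cons l t ih =>
    simp only [List.foldl_cons, List.filter_cons, pvStep]
    by_cases h1 : p1 l = true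
    · simp [h1, e21 l h1, e31 l h1, e41 l h1, e51 l h1, ih]
    · by_cases h2 : p2 l = true
      · simp [h1, h2, e32 l h2, e42 l h2, e52 l h2, ih]
      · by_cases h3 : p3 l = true
        · simp [h1, h2, h3, e43 l h3, e53 l h3, ih]
        · by_cases h4 : p4 l = true
          · simp [h1, h2, h3, h4, e54 l h4, ih]
          · by_cases h5 : p5 l = true
            · simp [h1, h2, h3, h4, h5, ih]
            · simp [h1, h2, h3, h4, h5, ih]

-- ===== VERDICT (by name: the statement is the Claim_ definition above) =====
theorem sort_headers_spec : Claim_equal_sort_headers := by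
  intro lines _
  unfold Spec_sort_headers sort_headers sort_headers_alt
  have hstep : sortHeadersStepA =
      pvStep (fun l => PySem.Str.startswith l "##INFO") (fun l => PySem.Str.startswith l "##FORMAT")
        (fun l => PySem.Str.startswith l "##FILTER") (fun l => PySem.Str.startswith l "##contig")
        (fun l => PySem.Str.startswith l "##fileformat") := rfl
  have h := pv_gen (fun l => PySem.Str.startswith l "##INFO") (fun l => PySem.Str.startswith l "##FORMAT")
      (fun l => PySem.Str.startswith l "##FILTER") (fun l => PySem.Str.startswith l "##contig")
      (fun l => PySem.Str.startswith l "##fileformat")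
      (fun l => pv_sw_excl l "##INFO" "##FORMAT" (by decide) (by decide))
      (fun l => pv_sw_excl l "##INFO" "##FILTER" (by decide) (by decide))
      (fun l => pv_sw_excl l "##FORMAT" "##FILTER" (by decide) (by decide))
      (fun l => pv_sw_excl l "##INFO" "##contig" (by decide) (by decide))
      (fun l => pv_sw_excl l "##FORMAT" "##contig" (by decide) (by decide))
      (fun l => pv_sw_excl l "##FILTER" "##contig" (by decide) (by decide))
      (fun l => pv_sw_excl l "##INFO" "##fileformat" (by decide) (by decide))
      (fun l => pv_sw_excl l "##FORMAT" "##fileformat" (by decide) (by decide))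
      (fun l => pv_sw_excl l "##FILTER" "##fileformat" (by decide) (by decide))
      (fun l => pv_sw_excl l "##contig" "##fileformat" (by decide) (by decide))
      lines [] [] [] [] [] []
  simp only [List.nil_append] at h
  rw [hstep, h]
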